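-- pv_equiv track=rewrite | github.com/Eliminater74/eXtended-Parameter-Designer | xpdm/gui.py | MakeWildCard
-- ===== SOURCE A (Python) =====
-- def MakeWildCard(arr):
--     res = []
--     max_len = 0
--     for x in arr:
--         x = x.split('/')
--         res.append(x)
--         if len(x) > max_len:
--             max_len = len(x)
--
--     for n in range(0, max_len):
--         if n >= len(res[0]):
--             break
--
--         val = res[0][n]
--         eq = True
--         for y in res:
--             if (n >= len(y)) or (y[n] != val):
--                 eq = False
--                 break
--         if eq:
--             for y in res:
--                 y[n] = "*"
--
--     for n in range(len(res)):
--         res[n] = "/".join(res[n])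
--     return res
-- ===== SOURCE B (Python) =====
-- def MakeWildCard(arr):
--     rows = [x.split('/') for x in arr]
--     if not rows:
--         return []
--     # candidate token per column of row 0; None once any row refutes it
--     mask = list(rows[0])
--     for row in rows[1:]:
--         mask = [t if t is not None and i < len(row) and row[i] == t else None
--                 for i, t in enumerate(mask)]
--     return ['/'.join('*' if i < len(mask) and mask[i] is not None else t
--                      for i, t in enumerate(row))
--             for row in rows]
-- ===== Notes on version B (the rewrite author's own statement) =====
-- stated objective: alternative
-- what changed: A scans column-major (for each column index, rescan all rows with a break, then mutate every row in place); B makes a single row-major fold that intersects a candidate-token mask seeded from row 0, then rebuilds each row against the final mask.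
import Mathlib
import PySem

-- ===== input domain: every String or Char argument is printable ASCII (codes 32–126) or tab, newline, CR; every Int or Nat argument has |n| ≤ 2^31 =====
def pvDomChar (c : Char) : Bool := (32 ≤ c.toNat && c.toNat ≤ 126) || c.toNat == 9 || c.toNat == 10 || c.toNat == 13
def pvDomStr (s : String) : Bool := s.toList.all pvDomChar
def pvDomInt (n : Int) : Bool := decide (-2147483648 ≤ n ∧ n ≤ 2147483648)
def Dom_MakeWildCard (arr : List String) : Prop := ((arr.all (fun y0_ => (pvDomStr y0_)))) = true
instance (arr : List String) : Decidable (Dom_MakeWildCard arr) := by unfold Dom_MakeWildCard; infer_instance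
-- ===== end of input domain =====

-- B replaces A's column-major loop (scan all rows per column, break, mutate in place) by a
-- single row-major fold intersecting a candidate-token mask; objective: alternative.

-- x.split('/') — sep "/" is nonempty, so split? is always `some` (exact)
def pySplitSlash (x : String) : List String := (PySem.Str.split? x "/").getD []

-- ===== PORT A =====
-- the `for n in range(0, max_len)` loop with its break, mutating res in place
def MakeWildCardLoop (maxLen : Nat) (res : List (List String)) (n : Nat) : List (List String) :=
  if _h : n < maxLen then
    -- Python indexes res[0]; res is nonempty whenever maxLen > 0, headD/getD are exact there
    if (res.headD []).length ≤ n then res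
    else
      let val := (res.headD []).getD n ""
      let eq := res.all (fun y => decide (n < y.length) && (y.getD n "" == val))
      let res' := if eq then res.map (fun y => y.set n "*") else res
      MakeWildCardLoop maxLen res' (n + 1)
  else res
termination_by maxLen - n

def MakeWildCard (arr : List String) : List String :=
  let res := arr.map (fun x => pySplitSlash x)
  let maxLen := res.foldl (fun m x => if m < x.length then x.length else m) 0
  let res2 := MakeWildCardLoop maxLen res 0
  res2.map (fun r => PySem.Str.join "/" r)

-- ===== PORT B =====
-- one comprehension step of the fold: intersect the candidate mask with one row
def maskStep (row : List String) (mask : List (Option String)) : List (Option String) :=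
  mask.mapIdx (fun i t =>
    if t.isSome ∧ i < row.length ∧ row.getD i "" = t.getD "" then t else none)

def MakeWildCard_alt (arr : List String) : List String :=
  let rows := arr.map (fun x => pySplitSlash x)
  match rows with
  | [] => []
  | r0 :: rest =>
    let mask := rest.foldl (fun m row => maskStep row m) (r0.map some)
    (r0 :: rest).map (fun row => PySem.Str.join "/"
      (row.mapIdx (fun i t => if (mask.getD i none).isSome then "*" else t)))

-- ===== PRECONDITION & SPEC =====
def Spec_MakeWildCard (arr : List String) (out : List String) : Prop := out = MakeWildCard_alt arr
instance (arr : List String) (out : List String) : Decidable (Spec_MakeWildCard arr out) := by unfold Spec_MakeWildCard; infer_instance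

-- ===== CLAIM =====
def Claim_equal_MakeWildCard : Prop := ∀ (arr : List String), Dom_MakeWildCard arr → Spec_MakeWildCard arr (MakeWildCard arr)

-- ===== LEMMAS AND PROOFS =====

-- column n is "wildcardable": every row is long enough and agrees with row 0
def goodCol (rows : List (List String)) (n : Nat) : Bool :=
  !rows.isEmpty && rows.all (fun y => decide (n < y.length) && (y.getD n "" == (rows.headD []).getD n ""))

-- rows with every wildcardable (per p) column replaced by "*"
def markCols (p : Nat → Bool) (rows : List (List String)) : List (List String) :=
  rows.map (fun r => r.mapIdx (fun i t => if p i then "*" else t))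

lemma markCols_congr (p q : Nat → Bool) (rows : List (List String))
    (h : ∀ r ∈ rows, ∀ i < r.length, p i = q i) : markCols p rows = markCols q rows := by
  unfold markCols
  refine List.map_congr_left (fun r hr => ?_)
  refine List.ext_getElem (by simp) (fun i h1 h2 => ?_)
  have hi : i < r.length := by simpa using h1
  simp only [List.getElem_mapIdx, h r hr i hi]

lemma markCols_false (rows : List (List String)) :
    markCols (fun _ => false) rows = rows := by
  unfold markCols
  refine List.map_congr_left (fun r _ => ?_) |>.trans (List.map_id rows)
  refine List.ext_getElem (by simp) (fun i h1 h2 => ?_)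
  simp

lemma goodCol_lt (rows : List (List String)) (n : Nat) (hg : goodCol rows n = true) :
    ∀ r ∈ rows, n < r.length := by
  intro r hr
  unfold goodCol at hg
  simp only [Bool.and_eq_true, List.all_eq_true, decide_eq_true_eq] at hg
  exact (hg.2 r hr).1

lemma foldl_maxlen_mono (rs : List (List String)) :
    ∀ b, b ≤ rs.foldl (fun m x => if m < x.length then x.length else m) b := by
  induction rs with
  | nil => simp
  | cons z zs ihz =>
    intro b
    simp only [List.foldl_cons]
    refine le_trans ?_ (ihz _)
    split <;> omega

lemma le_foldl_maxlen (rows : List (List String)) (a : Nat) :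
    (∀ r ∈ rows, r.length ≤ rows.foldl (fun m x => if m < x.length then x.length else m) a) := by
  induction rows generalizing a with
  | nil => simp
  | cons r rs ih =>
    intro y hy
    rcases List.mem_cons.1 hy with h | h
    · subst h
      simp only [List.foldl_cons]
      refine le_trans ?_ (foldl_maxlen_mono rs _)
      split <;> omega
    · exact ih _ y h

-- the central invariant: starting from rows with all wildcardable columns < n already marked,
-- the loop ends with every wildcardable column marked
lemma loop_mark (rows : List (List String)) (maxLen : Nat)
    (hML : ∀ r ∈ rows, r.length ≤ maxLen) :
    ∀ k n, maxLen ≤ n + k →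
      MakeWildCardLoop maxLen (markCols (fun i => decide (i < n) && goodCol rows i) rows) n
        = markCols (goodCol rows) rows := by
  intro k
  induction k with
  | zero =>
    intro n hn
    rw [MakeWildCardLoop]
    have : ¬ n < maxLen := by omega
    simp only [this, dite_false]
    refine markCols_congr _ _ rows (fun r hr i hi => ?_)
    by_cases hg : goodCol rows i = true
    · have : i < n := lt_of_lt_of_le (lt_of_lt_of_le (goodCol_lt rows i hg r hr) (hML r hr)) hn
      simp [this, hg]
    · simp [Bool.not_eq_true] at hg; simp [hg]
  | succ k ih =>
    intro n hn
    by_cases hlt : n < maxLen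
    · rw [MakeWildCardLoop]
      simp only [hlt, dite_true]
      cases hrows : rows with
      | nil =>
        subst hrows
        simp [markCols]
      | cons r0 rs =>
        have hne : rows ≠ [] := by rw [hrows]; simp
        rw [← hrows]
        have hhead : (markCols (fun i => decide (i < n) && goodCol rows i) rows).headD []
            = r0.mapIdx (fun i t => if (decide (i < n) && goodCol rows i) then "*" else t) := by
          rw [hrows]; rfl
        by_cases hbr : r0.length ≤ n
        · -- break: columns ≥ n are never wildcardable since row 0 is too short
          have hlen : ((markCols (fun i => decide (i < n) && goodCol rows i) rows).headD []).length ≤ n := by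
            rw [hhead]; simpa using hbr
          simp only [hlen, ite_true]
          refine markCols_congr _ _ rows (fun r hr i hi => ?_)
          by_cases hg : goodCol rows i = true
          · have hi0 : i < r0.length := goodCol_lt rows i hg r0 (by rw [hrows]; exact List.mem_cons_self)
            have : i < n := lt_of_lt_of_le hi0 hbr
            simp [this, hg]
          · simp [Bool.not_eq_true] at hg; simp [hg]
        · have hlen : ¬ ((markCols (fun i => decide (i < n) && goodCol rows i) rows).headD []).length ≤ n := by
            rw [hhead]; simpa using hbr
          simp only [hlen, ite_false]
          -- val = row0[n] (column n is not yet marked)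
          have hval : ((markCols (fun i => decide (i < n) && goodCol rows i) rows).headD []).getD n ""
              = r0.getD n "" := by
            rw [hhead]
            have hn0 : n < r0.length := by omega
            rw [List.getD_eq_getElem _ _ (by simpa using hn0), List.getD_eq_getElem _ _ hn0]
            simp [List.getElem_mapIdx]
          have hgetD : ∀ (y : List String),
              (y.mapIdx (fun i t => if (decide (i < n) && goodCol rows i) then "*" else t)).getD n ""
              = y.getD n "" := by
            intro y
            by_cases hny : n < y.length
            · rw [List.getD_eq_getElem _ _ (by simpa using hny), List.getD_eq_getElem _ _ hny]
              simp [List.getElem_mapIdx]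
            · rw [List.getD_eq_default _ _ (by simpa using (by omega : y.length ≤ n)),
                  List.getD_eq_default _ _ (by omega)]
          have hr0 : (rows.headD []).getD n "" = r0.getD n "" := by rw [hrows]; rfl
          have hne' : rows.isEmpty = false := by rw [hrows]; rfl
          have hgood : goodCol rows n
              = rows.all (fun y => decide (n < y.length) && (y.getD n "" == r0.getD n "")) := by
            unfold goodCol
            simp only [hr0, hne', Bool.not_false, Bool.true_and]
          have heq : ((markCols (fun i => decide (i < n) && goodCol rows i) rows).all
              (fun y => decide (n < y.length) &&
                (y.getD n "" == ((markCols (fun i => decide (i < n) && goodCol rows i) rows).headD []).getD n "")))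
              = goodCol rows n := by
            rw [hval, hgood]
            unfold markCols
            rw [List.all_map]
            refine List.all_congr rfl (fun y => ?_)
            simp only [Function.comp_apply, List.length_mapIdx, hgetD y]
          rw [heq]
          by_cases hg : goodCol rows n = true
          · simp only [hg, ite_true]
            have hmap : (markCols (fun i => decide (i < n) && goodCol rows i) rows).map (fun y => y.set n "*")
                = markCols (fun i => decide (i < n + 1) && goodCol rows i) rows := by
              unfold markCols
              rw [List.map_map]
              refine List.map_congr_left (fun r hr => ?_)
              refine List.ext_getElem (by simp) (fun i h1 h2 => ?_)
              have hi : i < r.length := by simpa using h2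
              simp only [Function.comp_apply]
              rw [List.getElem_set]
              by_cases hin : n = i
              · subst hin; simp [hg]
              · simp only [hin, ite_false, List.getElem_mapIdx]
                have : (decide (i < n) : Bool) = decide (i < n + 1) := by
                  simp only [decide_eq_decide]; omega
                simp only [this]
            rw [hmap]
            exact ih (n + 1) (by omega)
          · simp only [hg]
            have hB : goodCol rows n = false := by simpa using hg
            have hsame : markCols (fun i => decide (i < n) && goodCol rows i) rows
                = markCols (fun i => decide (i < n + 1) && goodCol rows i) rows := by
              refine markCols_congr _ _ rows (fun r hr i hi => ?_)
              by_cases hin : i = n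
              · subst hin; simp [hB]
              · have : (decide (i < n) : Bool) = decide (i < n + 1) := by
                  simp only [decide_eq_decide]; omega
                simp only [this]
            rw [hsame]
            exact ih (n + 1) (by omega)
    · rw [MakeWildCardLoop]
      simp only [hlt, dite_false]
      refine markCols_congr _ _ rows (fun r hr i hi => ?_)
      by_cases hg : goodCol rows i = true
      · have : i < n := lt_of_lt_of_le (lt_of_lt_of_le (goodCol_lt rows i hg r hr) (hML r hr)) (le_of_not_gt hlt)
        simp [this, hg]
      · simp [Bool.not_eq_true] at hg; simp [hg]

-- A's whole token phase is markCols goodCol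
lemma loopA_eq (rows : List (List String)) :
    MakeWildCardLoop (rows.foldl (fun m x => if m < x.length then x.length else m) 0) rows 0
      = markCols (goodCol rows) rows := by
  set maxLen := rows.foldl (fun m x => if m < x.length then x.length else m) 0 with hml
  have h0 : markCols (fun i => decide (i < 0) && goodCol rows i) rows = rows := by
    have : markCols (fun i => decide (i < 0) && goodCol rows i) rows
        = markCols (fun _ => false) rows :=
      markCols_congr _ _ rows (by intro r _ i _; simp)
    rw [this, markCols_false]
  have := loop_mark rows maxLen (le_foldl_maxlen rows 0) maxLen 0 (by omega)
  rwa [h0] at this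

-- B's fold over the remaining rows, characterised element-wise
lemma foldl_mask_getD (i : Nat) : ∀ (rest : List (List String)) (m0 : List (Option String)),
    (rest.foldl (fun m row => maskStep row m) m0).getD i none
      = match m0.getD i none with
        | none => none
        | some s => if ∀ row ∈ rest, i < row.length ∧ row.getD i "" = s then some s else none := by
  intro rest
  induction rest with
  | nil =>
    intro m0
    simp only [List.foldl_nil]
    cases h : m0.getD i none with
    | none => simp
    | some s => simp
  | cons row rs ih =>
    intro m0
    simp only [List.foldl_cons]
    rw [ih]
    have hstep : (maskStep row m0).getD i none
        = match m0.getD i none with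
          | none => none
          | some s => if i < row.length ∧ row.getD i "" = s then some s else none := by
      unfold maskStep
      by_cases hi : i < m0.length
      · rw [List.getD_eq_getElem _ _ (by simpa using hi), List.getD_eq_getElem _ _ hi,
            List.getElem_mapIdx]
        cases h : m0[i] with
        | none => simp
        | some s => simp [Option.getD]
      · rw [List.getD_eq_default _ _ (by simpa using (by omega : m0.length ≤ i)),
            List.getD_eq_default _ _ (by omega)]
    rw [hstep]
    cases h : m0.getD i none with
    | none => simp
    | some s =>
      simp only []
      by_cases hc : i < row.length ∧ row.getD i "" = s
      · rw [if_pos hc]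
        simp only []
        by_cases hall : ∀ r ∈ rs, i < r.length ∧ r.getD i "" = s
        · rw [if_pos hall, if_pos (by
            intro r hr
            rcases List.mem_cons.1 hr with h' | h'
            · subst h'; exact hc
            · exact hall r h')]
        · rw [if_neg hall, if_neg (by
            intro hx
            exact hall (fun r hr => hx r (List.mem_cons_of_mem _ hr)))]
      · rw [if_neg hc]
        simp only []
        rw [if_neg (by
          intro hx
          exact hc (hx row List.mem_cons_self))]

-- mask membership is exactly goodCol, for rows = r0 :: rest
lemma mask_isSome_eq_goodCol (r0 : List String) (rest : List (List String)) (i : Nat) :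
    ((rest.foldl (fun m row => maskStep row m) (r0.map some)).getD i none).isSome
      = goodCol (r0 :: rest) i := by
  rw [foldl_mask_getD]
  have hm0 : (r0.map some).getD i none
      = if h : i < r0.length then some r0[i] else none := by
    by_cases hi : i < r0.length
    · rw [dif_pos hi, List.getD_eq_getElem _ _ (by simpa using hi)]
      simp
    · rw [dif_neg hi, List.getD_eq_default _ _ (by simpa using (by omega : r0.length ≤ i))]
  rw [hm0]
  by_cases hi : i < r0.length
  · rw [dif_pos hi]
    simp only []
    have hget : r0.getD i "" = r0[i] := List.getD_eq_getElem _ _ hi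
    by_cases hall : ∀ row ∈ rest, i < row.length ∧ row.getD i "" = r0[i]
    · rw [if_pos hall]
      have : goodCol (r0 :: rest) i = true := by
        unfold goodCol
        simp only [List.isEmpty_cons, Bool.not_false, Bool.true_and, List.all_eq_true]
        intro y hy
        simp only [Bool.and_eq_true, decide_eq_true_eq, beq_iff_eq, List.headD_cons]
        rcases List.mem_cons.1 hy with h' | h'
        · subst h'; exact ⟨hi, rfl⟩
        · exact ⟨(hall y h').1, by rw [(hall y h').2, hget]⟩
      simp [this]
    · rw [if_neg hall]
      have : goodCol (r0 :: rest) i = false := by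
        rw [Bool.eq_false_iff]
        intro hg
        apply hall
        intro row hrow
        have h1 := goodCol_lt _ _ hg row (List.mem_cons_of_mem _ hrow)
        unfold goodCol at hg
        simp only [Bool.and_eq_true, List.all_eq_true] at hg
        have := hg.2 row (List.mem_cons_of_mem _ hrow)
        simp only [decide_eq_true_eq, beq_iff_eq, List.headD_cons] at this
        exact ⟨h1, by rw [this.2, hget]⟩
      simp [this]
  · rw [dif_neg hi]
    have : goodCol (r0 :: rest) i = false := by
      rw [Bool.eq_false_iff]
      intro hg
      exact hi (goodCol_lt _ _ hg r0 List.mem_cons_self)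
    simp [this]

-- ===== VERDICT =====
theorem MakeWildCard_spec : Claim_equal_MakeWildCard := by
  intro arr _
  unfold Spec_MakeWildCard MakeWildCard MakeWildCard_alt
  simp only []
  rw [loopA_eq]
  cases hrows : arr.map (fun x => pySplitSlash x) with
  | nil => simp [markCols]
  | cons r0 rest =>
    simp only []
    unfold markCols
    rw [List.map_map]
    refine List.map_congr_left (fun row hrow => ?_)
    simp only [Function.comp_apply]
    congr 1
    refine List.ext_getElem (by simp) (fun i h1 h2 => ?_)
    simp only [List.getElem_mapIdx]
    rw [mask_isSome_eq_goodCol r0 rest i]
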